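-- pv_equiv track=rewrite | github.com/ailleen1004/Algorithm_Study | 프로그래머스/lv1/17681. ［1차］ 비밀지도/［1차］ 비밀지도.py | solution
-- ===== SOURCE A (Python) =====
-- def solution(n, arr1, arr2):
--     answer = []
--     map1 = [[0 for _ in range(n)] for _ in range(n)]
--     map2 = [[0 for _ in range(n)] for _ in range(n)]
--     for i in range(n):
--         count = 0
--         div = arr1[i]
--         if div==0:
--             continue
--         while(1):
--             if div==1:
--                 map1[i][count]=1
--                 break
--             div, mod = divmod(div, 2)
--             map1[i][count]=mod
--             count += 1
--         map1[i].reverse()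
--     for i in range(n):
--         count = 0
--         div = arr2[i]
--         if div==0:
--             continue
--         while(1):
--             if div==1:
--                 map2[i][count]=1
--                 break
--             div, mod = divmod(div, 2)
--             map2[i][count]=mod
--             count += 1
--         map2[i].reverse()
--     for i in range(n):
--         map = ''
--         for j in range(n):
--             if map1[i][j]==0 and map2[i][j]==0:
--                 map += " "
--             else:
--                 map += "#"
--         answer.append(map)
--     return answer
-- ===== SOURCE B (Python) =====
-- def solution(n, arr1, arr2):
--     return [''.join('#' if (arr1[i] | arr2[i]) >> (n - 1 - j) & 1 else ' '
--                     for j in range(n))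
--             for i in range(n)]
-- ===== Notes on version B (the rewrite author's own statement) =====
-- stated objective: simpler
-- what changed: Replaces A's two n-by-n grids built by divmod while-loops with per-row reversal and a final grid walk by a single comprehension that reads each output character directly as a bit of arr1[i]|arr2[i] via shift-and-mask.
import Mathlib
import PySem

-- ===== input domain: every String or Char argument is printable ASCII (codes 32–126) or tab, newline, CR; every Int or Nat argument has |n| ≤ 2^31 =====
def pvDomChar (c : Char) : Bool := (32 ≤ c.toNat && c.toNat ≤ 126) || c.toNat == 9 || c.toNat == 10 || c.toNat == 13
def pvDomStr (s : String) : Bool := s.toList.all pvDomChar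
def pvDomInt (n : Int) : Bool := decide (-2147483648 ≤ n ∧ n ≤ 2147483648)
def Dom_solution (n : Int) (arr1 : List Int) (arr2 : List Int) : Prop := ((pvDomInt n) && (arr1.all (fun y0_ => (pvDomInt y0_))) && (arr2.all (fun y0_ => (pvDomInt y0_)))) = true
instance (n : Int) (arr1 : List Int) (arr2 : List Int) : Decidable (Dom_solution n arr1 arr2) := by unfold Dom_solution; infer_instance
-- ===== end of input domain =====

-- B replaces A's two divmod-built bit grids (with per-row reversal and a final grid walk)
-- by reading each output character directly as a bit of arr1[i]|arr2[i] via shift-and-mask (simpler, same O(n^2)).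


-- ===== PORT A =====
-- A's inner `while(1)` loop on one row: writes divmod remainders LSB-first at positions
-- count, count+1, … (list assignment ported as List.set; in-range under Pre_).
-- fuel bounds the recursion; `div.toNat + 1` steps always suffice on the inputs Pre_ admits
-- (Python diverges on negative values and raises IndexError on values ≥ 2^n — both outside Pre_).
def pvLoopA (fuel : Nat) (dv : Int) (count : Nat) (row : List Int) : List Int :=
  match fuel with
  | 0 => row
  | fuel + 1 =>
    if dv = 1 then row.set count 1
    else pvLoopA fuel (PySem.Int.floordiv dv 2) (count + 1) (row.set count (PySem.Int.mod dv 2))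

-- one row of map1/map2: zeros row, skipped (`continue`) if the value is 0, else filled and reversed
def pvRow (nn : Nat) (v : Int) : List Int :=
  if v = 0 then List.replicate nn 0
  else (pvLoopA (v.toNat + 1) v 0 (List.replicate nn 0)).reverse

def solution (n : Int) (arr1 : List Int) (arr2 : List Int) : List String :=
  let map1 := (PySem.List.pyRange 0 n 1).map (fun i => pvRow n.toNat (PySem.List.pyGetD arr1 i 0))
  let map2 := (PySem.List.pyRange 0 n 1).map (fun i => pvRow n.toNat (PySem.List.pyGetD arr2 i 0))
  (PySem.List.pyRange 0 n 1).foldl (fun answer i =>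
    answer ++ [String.ofList ((PySem.List.pyRange 0 n 1).foldl (fun s j =>
      s ++ [if PySem.List.pyGetD (PySem.List.pyGetD map1 i []) j 0 = 0 ∧
               PySem.List.pyGetD (PySem.List.pyGetD map2 i []) j 0 = 0 then ' ' else '#']) [])]) []

-- ===== PORT B =====
-- Source B: one comprehension; character j of row i is bit (n-1-j) of arr1[i] | arr2[i].
-- (the shift amount n-1-j is nonnegative for j in range(n), so `.toNat` is exact)
def solution_alt (n : Int) (arr1 : List Int) (arr2 : List Int) : List String :=
  (PySem.List.pyRange 0 n 1).map (fun i =>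
    String.ofList ((PySem.List.pyRange 0 n 1).map (fun j =>
      if PySem.Int.band (PySem.Int.bor (PySem.List.pyGetD arr1 i 0) (PySem.List.pyGetD arr2 i 0) >>> (n - 1 - j).toNat) 1 ≠ 0
      then '#' else ' ')))

-- ===== PRECONDITION & SPEC =====
-- Pre_ is exactly where the Python A returns: both lists reach index n-1, and each used value v
-- satisfies 0 ≤ v < 2^n (A loops forever on negative values, and raises IndexError on a short
-- list or on a value needing more than n bits).
def Pre_solution (n : Int) (arr1 : List Int) (arr2 : List Int) : Prop :=
  n.toNat ≤ arr1.length ∧ n.toNat ≤ arr2.length ∧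
  (∀ v ∈ arr1.take n.toNat, 0 ≤ v ∧ v < 2 ^ n.toNat) ∧
  (∀ v ∈ arr2.take n.toNat, 0 ≤ v ∧ v < 2 ^ n.toNat)
instance (n : Int) (arr1 : List Int) (arr2 : List Int) : Decidable (Pre_solution n arr1 arr2) := by
  unfold Pre_solution; infer_instance

def pvWitness_solution : Int × List Int × List Int := (2, [2, 1], [1, 3])

def Spec_solution (n : Int) (arr1 : List Int) (arr2 : List Int) (out : List String) : Prop := out = solution_alt n arr1 arr2
instance (n : Int) (arr1 : List Int) (arr2 : List Int) (out : List String) : Decidable (Spec_solution n arr1 arr2 out) := by unfold Spec_solution; infer_instance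

-- ===== CLAIM (what is proved, stated in full; the proofs are below) =====
def Claim_equal_solution : Prop := ∀ (n : Int) (arr1 : List Int) (arr2 : List Int), Dom_solution n arr1 arr2 → Pre_solution n arr1 arr2 → Spec_solution n arr1 arr2 (solution n arr1 arr2)

-- ===== LEMMAS AND PROOFS =====

-- the bit (nn-1-j) of a value, as the Int 0/1 that A's grids hold
def pvBit (w k : Nat) : Int := if w.testBit k then 1 else 0

theorem pvBlen_le_iff (w k : Nat) : PySem.Int.bitLength (w : Int) ≤ k ↔ w < 2 ^ k := by
  rcases Nat.eq_zero_or_pos w with h | h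
  · subst h
    simp
  · have hnat : ((w : Int)).natAbs = w := by simp
    constructor
    · intro hle
      have h1 := PySem.Int.lt_two_pow_bitLength (w : Int)
      calc w = ((w : Int)).natAbs := hnat.symm
        _ < 2 ^ PySem.Int.bitLength (w : Int) := h1
        _ ≤ 2 ^ k := Nat.pow_le_pow_right (by omega) hle
    · intro hlt
      by_contra hk
      have hne : ((w : Int)) ≠ 0 := by exact_mod_cast Nat.pos_iff_ne_zero.mp h
      have h2 := PySem.Int.two_pow_bitLength_le (w : Int) hne
      rw [hnat] at h2
      have h3 : 2 ^ k ≤ 2 ^ (PySem.Int.bitLength (w : Int) - 1) :=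
        Nat.pow_le_pow_right (by omega) (by omega)
      omega

theorem pvLoopA_spec (fuel : Nat) : ∀ (w count : Nat) (row : List Int),
    1 ≤ w → w ≤ fuel → count + PySem.Int.bitLength (w : Int) ≤ row.length →
    ∀ k : Nat, (pvLoopA fuel (w : Int) count row)[k]? =
      if count ≤ k ∧ k < count + PySem.Int.bitLength (w : Int) then some (pvBit w (k - count))
      else row[k]? := by
  induction fuel with
  | zero => intro w count row h1 h2 _ _; omega
  | succ fuel ih =>
    intro w count row h1 h2 hlen k
    by_cases hw : w = 1
    · subst hw
      have hb1 : PySem.Int.bitLength ((1 : Nat) : Int) = 1 := by decide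
      simp only [pvLoopA]
      rw [if_pos (by norm_num), List.getElem?_set, hb1]
      by_cases hk : count = k
      · subst hk
        rw [if_pos rfl, if_pos (by omega), if_pos (by omega)]
        simp [pvBit]
      · rw [if_neg hk, if_neg (by omega)]
    · have hw2 : 2 ≤ w := by omega
      have hne : ((w : Int)) ≠ 1 := by exact_mod_cast hw
      have hfd : PySem.Int.floordiv (w : Int) 2 = ((w / 2 : Nat) : Int) := by
        exact_mod_cast PySem.Int.floordiv_natCast w 2
      have hmd : PySem.Int.mod (w : Int) 2 = ((w % 2 : Nat) : Int) := by
        exact_mod_cast PySem.Int.mod_natCast w 2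
      have hbl : PySem.Int.bitLength (w : Int) = PySem.Int.bitLength ((w / 2 : Nat) : Int) + 1 :=
        PySem.Int.bitLength_natCast (by omega)
      simp only [pvLoopA, if_neg hne, hfd, hmd]
      rw [hbl] at hlen
      rw [ih (w / 2) (count + 1) _ (by omega) (by omega) (by simp only [List.length_set]; omega)]
      rw [hbl]
      rw [List.getElem?_set]
      by_cases hk1 : k = count
      · subst hk1
        rw [if_neg (by omega), if_pos rfl, if_pos (by omega), if_pos (by omega)]
        congr 1
        simp only [pvBit, Nat.sub_self, Nat.testBit_zero]
        rcases Nat.mod_two_eq_zero_or_one w with h | h <;> simp [h]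
      · by_cases hk2 : count + 1 ≤ k ∧ k < count + 1 + PySem.Int.bitLength ((w / 2 : Nat) : Int)
        · rw [if_pos hk2, if_pos (by omega)]
          congr 1
          simp only [pvBit]
          have hks : k - count = (k - (count + 1)) + 1 := by omega
          rw [hks, Nat.testBit_add_one]
        · rw [if_neg hk2, if_neg (fun hx => hk1 (by omega)), if_neg (by omega)]

theorem pvReverseMapRange (nn : Nat) (f : Nat → Int) :
    ((List.range nn).map f).reverse = (List.range nn).map (fun j => f (nn - 1 - j)) := by
  apply List.ext_getElem (by simp)
  intro i h1 h2
  simp only [List.getElem_reverse, List.getElem_map, List.getElem_range, List.length_map,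
    List.length_range]

theorem pvRow_spec (nn : Nat) (v : Int) (h0 : 0 ≤ v) (h1 : v < 2 ^ nn) :
    pvRow nn v = (List.range nn).map (fun j => pvBit v.toNat (nn - 1 - j)) := by
  obtain ⟨w, rfl⟩ : ∃ w : Nat, v = (w : Int) := ⟨v.toNat, (Int.toNat_of_nonneg h0).symm⟩
  simp only [Int.toNat_natCast]
  by_cases hv : w = 0
  · subst hv
    simp [pvRow, pvBit, Nat.zero_testBit, List.map_const', List.length_range]
  · have hw1 : 1 ≤ w := by omega
    have hwlt : w < 2 ^ nn := by exact_mod_cast h1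
    have hble : PySem.Int.bitLength (w : Int) ≤ nn := (pvBlen_le_iff _ _).mpr hwlt
    rw [pvRow, if_neg (by exact_mod_cast hv)]
    simp only [Int.toNat_natCast]
    have hmain : pvLoopA (w + 1) (w : Int) 0 (List.replicate nn 0) =
        (List.range nn).map (fun k => pvBit w k) := by
      apply List.ext_getElem?
      intro k
      rw [pvLoopA_spec (w + 1) w 0 _ hw1 (by omega) (by simpa using hble) k]
      simp only [Nat.zero_add, Nat.zero_le, true_and, Nat.sub_zero]
      by_cases hk : k < nn
      · rw [List.getElem?_map, List.getElem?_range hk]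
        by_cases hkb : k < PySem.Int.bitLength (w : Int)
        · simp [hkb]
        · rw [if_neg hkb]
          have hlt2 : w < 2 ^ k := (pvBlen_le_iff _ _).mp (by omega)
          have htb : w.testBit k = false := Nat.testBit_lt_two_pow hlt2
          simp [hk, pvBit, htb]
      · rw [if_neg (by omega), List.getElem?_eq_none (by simp; omega),
          List.getElem?_eq_none (by simp; omega)]
    rw [hmain, pvReverseMapRange]

theorem pvB_char (a b : Int) (ha : 0 ≤ a) (hb : 0 ≤ b) (k : Nat) :
    (PySem.Int.band (PySem.Int.bor a b >>> k) 1 ≠ 0) ↔ (a.toNat ||| b.toNat).testBit k = true := by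
  have hbor : PySem.Int.bor a b = ((a.toNat ||| b.toNat : Nat) : Int) := by
    rw [← Int.toNat_of_nonneg ha, ← Int.toNat_of_nonneg hb]
    exact_mod_cast PySem.Int.bor_natCast a.toNat b.toNat
  rw [hbor]
  have hshift : (((a.toNat ||| b.toNat : Nat) : Int) >>> k) = (((a.toNat ||| b.toNat) >>> k : Nat) : Int) := rfl
  rw [hshift]
  have hband : PySem.Int.band ((((a.toNat ||| b.toNat) >>> k : Nat) : Int)) 1 = ((((a.toNat ||| b.toNat) >>> k) &&& 1 : Nat) : Int) := by
    exact_mod_cast PySem.Int.band_natCast ((a.toNat ||| b.toNat) >>> k) 1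
  rw [hband]
  rw [Nat.and_one_is_mod, Nat.shiftRight_eq_div_pow]
  rw [Nat.testBit_eq_decide_div_mod_eq]
  rcases Nat.mod_two_eq_zero_or_one ((a.toNat ||| b.toNat) / 2 ^ k) with h | h <;> simp [h]

-- ===== VERDICT (by name: the statement is the Claim_ definition above) =====
theorem solution_spec : Claim_equal_solution := by
  intro n arr1 arr2 _ hpre
  unfold Spec_solution
  obtain ⟨hl1, hl2, hv1, hv2⟩ := hpre
  simp only [solution, solution_alt]
  rw [PySem.List.foldl_append_singleton_eq_map, List.nil_append]
  apply List.map_congr_left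
  intro i hi
  rw [PySem.List.mem_pyRange_one] at hi
  obtain ⟨hi0, hin⟩ := hi
  have hnpos : 0 < n := lt_of_le_of_lt hi0 hin
  rw [PySem.List.foldl_append_singleton_eq_map, List.nil_append]
  congr 1
  rw [PySem.List.pyGetD_map_pyRange_of_nonneg _ n i [] hi0 hin,
      PySem.List.pyGetD_map_pyRange_of_nonneg _ n i [] hi0 hin]
  lift i to ℕ using hi0 with ii
  have hiin : ii < n.toNat := by omega
  have hii1 : ii < arr1.length := by omega
  have hii2 : ii < arr2.length := by omega
  have hg1 : PySem.List.pyGetD arr1 (ii : Int) 0 = arr1[ii] := by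
    simp [PySem.List.pyGetD_natCast, List.getD_eq_getElem?_getD, List.getElem?_eq_getElem hii1]
  have hg2 : PySem.List.pyGetD arr2 (ii : Int) 0 = arr2[ii] := by
    simp [PySem.List.pyGetD_natCast, List.getD_eq_getElem?_getD, List.getElem?_eq_getElem hii2]
  have hmem1 : arr1[ii] ∈ arr1.take n.toNat := by
    have h' : ii < (arr1.take n.toNat).length := by simp; omega
    have he : (arr1.take n.toNat)[ii]'h' = arr1[ii] := List.getElem_take
    rw [← he]; exact List.getElem_mem h'
  have hmem2 : arr2[ii] ∈ arr2.take n.toNat := by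
    have h' : ii < (arr2.take n.toNat).length := by simp; omega
    have he : (arr2.take n.toNat)[ii]'h' = arr2[ii] := List.getElem_take
    rw [← he]; exact List.getElem_mem h'
  obtain ⟨ha0, ha1⟩ := hv1 _ hmem1
  obtain ⟨hb0, hb1⟩ := hv2 _ hmem2
  rw [hg1, hg2, pvRow_spec n.toNat arr1[ii] ha0 ha1, pvRow_spec n.toNat arr2[ii] hb0 hb1]
  apply List.map_congr_left
  intro j hj
  rw [PySem.List.mem_pyRange_one] at hj
  obtain ⟨hj0, hjn⟩ := hj
  lift j to ℕ using hj0 with jj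
  have hjjn : jj < n.toNat := by omega
  have hgA1 : PySem.List.pyGetD ((List.range n.toNat).map (fun j => pvBit arr1[ii].toNat (n.toNat - 1 - j))) (jj : Int) 0 = pvBit arr1[ii].toNat (n.toNat - 1 - jj) := by
    simp [PySem.List.pyGetD_natCast, hjjn]
  have hgA2 : PySem.List.pyGetD ((List.range n.toNat).map (fun j => pvBit arr2[ii].toNat (n.toNat - 1 - j))) (jj : Int) 0 = pvBit arr2[ii].toNat (n.toNat - 1 - jj) := by
    simp [PySem.List.pyGetD_natCast, hjjn]
  rw [hgA1, hgA2]
  have hsh : (n - 1 - (jj : Int)).toNat = n.toNat - 1 - jj := by omega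
  rw [hsh]
  by_cases hc : (arr1[ii].toNat ||| arr2[ii].toNat).testBit (n.toNat - 1 - jj) = true
  · rw [if_pos ((pvB_char _ _ ha0 hb0 _).mpr hc)]
    rw [Nat.testBit_or] at hc
    rw [if_neg]
    simp only [pvBit]
    rcases Bool.or_eq_true_iff.mp hc with h | h <;> simp [h]
  · rw [if_neg (fun hx => hc ((pvB_char _ _ ha0 hb0 _).mp hx))]
    rw [Nat.testBit_or] at hc
    simp only [Bool.or_eq_true, not_or, Bool.not_eq_true] at hc
    rw [if_pos]
    simp [pvBit, hc.1, hc.2]
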